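-- pv_equiv track=rewrite | github.com/CrispyW0nton/GModular | gmodular/formats/mdl_writer.py | _compute_face_adjacency
-- ===== SOURCE A (Python) =====
-- from typing import List, Optional, Tuple, Dict, Any
--
-- def _compute_face_adjacency(faces):
--     nf = len(faces)
--     adj = [[-1, -1, -1] for _ in range(nf)]
--     # Build edge → face/edge index map
--     edge_map: Dict[tuple, Tuple[int, int]] = {}
--     for fi, face in enumerate(faces):
--         for ei in range(3):
--             a = face[ei]
--             b = face[(ei + 1) % 3]
--             key = (min(a, b), max(a, b))
--             if key in edge_map:
--                 fi2, ei2 = edge_map[key]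
--                 adj[fi][ei] = fi2
--                 adj[fi2][ei2] = fi
--             else:
--                 edge_map[key] = (fi, ei)
--     return adj
-- ===== SOURCE B (Python) =====
-- def _compute_face_adjacency(faces):
--     # One pass records, per normalized edge key, its first and last (face, slot)
--     # occurrence; each adjacency slot is then computed by a closed-form rule,
--     # with no incremental mutation of the adjacency rows.
--     def ekey(face, ei):
--         a, b = face[ei], face[(ei + 1) % 3]
--         return (a, b) if a <= b else (b, a)
--     first = {}
--     last = {}
--     for fi, face in enumerate(faces):
--         for ei in range(3):
--             k = ekey(face, ei)
--             first.setdefault(k, (fi, ei))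
--             last[k] = (fi, ei)
--     def slot(fi, face, ei):
--         k = ekey(face, ei)
--         if first[k] != (fi, ei):
--             return first[k][0]
--         if last[k] != (fi, ei):
--             return last[k][0]
--         return -1
--     return [[slot(fi, face, ei) for ei in range(3)] for fi, face in enumerate(faces)]
-- ===== Notes on version B (the rewrite author's own statement) =====
-- stated objective: alternative
-- what changed: A interleaves building an edge->first-occurrence dict with in-place adjacency writes in one mutating pass; B records each normalized edge's first and last (face, slot) occurrence in one pass and then computes every adjacency slot by a closed-form rule (link to first occurrence, anchor links to last), with no mutation of adjacency rows.
import Mathlib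
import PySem

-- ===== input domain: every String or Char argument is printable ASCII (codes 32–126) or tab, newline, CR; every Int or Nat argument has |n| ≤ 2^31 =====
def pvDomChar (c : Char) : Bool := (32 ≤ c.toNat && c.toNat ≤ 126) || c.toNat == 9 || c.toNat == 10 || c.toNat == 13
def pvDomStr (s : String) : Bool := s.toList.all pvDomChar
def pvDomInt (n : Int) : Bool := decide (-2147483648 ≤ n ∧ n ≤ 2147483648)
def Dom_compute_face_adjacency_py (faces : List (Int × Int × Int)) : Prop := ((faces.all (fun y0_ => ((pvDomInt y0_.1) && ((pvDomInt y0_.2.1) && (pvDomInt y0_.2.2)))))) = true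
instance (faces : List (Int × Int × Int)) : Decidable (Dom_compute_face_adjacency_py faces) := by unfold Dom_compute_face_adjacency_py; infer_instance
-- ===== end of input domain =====

-- B replaces A's incremental edge-map/adjacency mutation by one pass recording each
-- edge's first and last occurrence plus a closed-form per-slot rule (objective: alternative).

-- ===== PORT A =====
-- face[i] for the indices 0,1,2 that the code reaches (exact there; other indices unreachable)
def tupGet3 (f : Int × Int × Int) (i : Int) : Int :=
  if i = 0 then f.1 else if i = 1 then f.2.1 else f.2.2

-- key = (min(a, b), max(a, b)) with a = face[ei], b = face[(ei + 1) % 3]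
def aEdgeKey (face : Int × Int × Int) (ei : Int) : Int × Int :=
  let a := tupGet3 face ei
  let b := tupGet3 face (PySem.Int.mod (ei + 1) 3)
  (min a b, max a b)

-- adj[fi][ei] = v  (both indices always in range where A executes this)
def setAdj (adj : List (List Int)) (fi ei : Int) (v : Int) : List (List Int) :=
  PySem.List.pySetD adj fi (PySem.List.pySetD (PySem.List.pyGetD adj fi []) ei v)

-- the body of A's inner loop over ei
def aStep (fi : Int) (face : Int × Int × Int)
    (st : List (List Int) × PySem.Dict (Int × Int) (Int × Int)) (ei : Int) :
    List (List Int) × PySem.Dict (Int × Int) (Int × Int) :=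
  let key := aEdgeKey face ei
  match st.2.get? key with
  | some (fi2, ei2) => (setAdj (setAdj st.1 fi ei fi2) fi2 ei2 fi, st.2)
  | none => (st.1, st.2.insert key (fi, ei))

def compute_face_adjacency_py (faces : List (Int × Int × Int)) : List (List Int) :=
  let adj0 := (PySem.List.pyRange 0 (faces.length : Int) 1).map (fun _ => ([-1, -1, -1] : List Int))
  let res := (PySem.List.enumerate faces).foldl
      (fun st p => (PySem.List.pyRange 0 3 1).foldl (aStep p.1 p.2) st)
      (adj0, PySem.Dict.empty)
  res.1

-- ===== PORT B =====
def bEdgeKey (face : Int × Int × Int) (ei : Int) : Int × Int :=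
  let a := tupGet3 face ei
  let b := tupGet3 face (PySem.Int.mod (ei + 1) 3)
  if a ≤ b then (a, b) else (b, a)

-- body of B's single recording pass: first.setdefault(k, (fi, ei)); last[k] = (fi, ei)
def bStep (fi : Int) (face : Int × Int × Int)
    (fl : PySem.Dict (Int × Int) (Int × Int) × PySem.Dict (Int × Int) (Int × Int)) (ei : Int) :
    PySem.Dict (Int × Int) (Int × Int) × PySem.Dict (Int × Int) (Int × Int) :=
  let k := bEdgeKey face ei
  (fl.1.setdefault k (fi, ei), fl.2.insert k (fi, ei))

-- B's closed-form slot rule (the dict lookups never miss where B calls this;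
-- the -1 fallback arm is unreachable, mirroring Python's never-raised KeyError)
def bSlot (first last : PySem.Dict (Int × Int) (Int × Int)) (fi : Int)
    (face : Int × Int × Int) (ei : Int) : Int :=
  let k := bEdgeKey face ei
  match first.get? k, last.get? k with
  | some f, some l => if f ≠ (fi, ei) then f.1 else if l ≠ (fi, ei) then l.1 else -1
  | _, _ => -1

def compute_face_adjacency_py_alt (faces : List (Int × Int × Int)) : List (List Int) :=
  let fl := (PySem.List.enumerate faces).foldl
      (fun fl p => (PySem.List.pyRange 0 3 1).foldl (bStep p.1 p.2) fl)
      (PySem.Dict.empty, PySem.Dict.empty)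
  (PySem.List.enumerate faces).map
    (fun p => (PySem.List.pyRange 0 3 1).map (bSlot fl.1 fl.2 p.1 p.2))

-- ===== PRECONDITION & SPEC =====
def Spec_compute_face_adjacency_py (faces : List (Int × Int × Int)) (out : List (List Int)) : Prop := out = compute_face_adjacency_py_alt faces
instance (faces : List (Int × Int × Int)) (out : List (List Int)) : Decidable (Spec_compute_face_adjacency_py faces out) := by unfold Spec_compute_face_adjacency_py; infer_instance

-- ===== CLAIM (what is proved, stated in full; the proofs are below) =====
def Claim_equal_compute_face_adjacency_py : Prop := ∀ (faces : List (Int × Int × Int)), Dom_compute_face_adjacency_py faces → Spec_compute_face_adjacency_py faces (compute_face_adjacency_py faces)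

-- ===== LEMMAS AND PROOFS =====

-- default face used to phrase list indexing in the proofs
def pvD0 : Int × Int × Int := (0, 0, 0)

-- key of the edge slot s = (fi, ei), read off the full face list
def kOf (faces : List (Int × Int × Int)) (s : Int × Int) : Int × Int :=
  aEdgeKey (PySem.List.pyGetD faces s.1 pvD0) s.2

-- first / last occurrence (face, slot) of key k in a processed slot list
def firstOcc (faces : List (Int × Int × Int)) (done : List (Int × Int)) (k : Int × Int) :
    Option (Int × Int) :=
  done.find? (fun s => kOf faces s == k)

def lastOcc (faces : List (Int × Int × Int)) (done : List (Int × Int)) (k : Int × Int) :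
    Option (Int × Int) :=
  done.reverse.find? (fun s => kOf faces s == k)

-- the value A's adjacency matrix holds at slot s after processing the slots in `done`
def specP (faces : List (Int × Int × Int)) (done : List (Int × Int)) (s : Int × Int) : Int :=
  if s ∈ done then
    match firstOcc faces done (kOf faces s) with
    | some p =>
        if p = s then
          match lastOcc faces done (kOf faces s) with
          | some q => if q = s then -1 else q.1
          | none => -1
        else p.1
    | none => -1
  else -1

def okSlot (n : Nat) (s : Int × Int) : Prop :=
  0 ≤ s.1 ∧ s.1 < (n : Int) ∧ (s.2 = 0 ∨ s.2 = 1 ∨ s.2 = 2)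

def buildAdj (n : Nat) (f : Int × Int → Int) : List (List Int) :=
  (PySem.List.pyRange 0 (n : Int) 1).map (fun i => [f (i, 0), f (i, 1), f (i, 2)])

lemma buildAdj_length (n : Nat) (f : Int × Int → Int) : (buildAdj n f).length = n := by
  simp [buildAdj, PySem.List.length_pyRange_one]

lemma buildAdj_getElem (n : Nat) (f : Int × Int → Int) (j : Nat) (h' : j < (buildAdj n f).length) :
    (buildAdj n f)[j]'h' = [f ((j : Int), 0), f ((j : Int), 1), f ((j : Int), 2)] := by
  simp only [buildAdj, List.getElem_map]
  rw [PySem.List.getElem_pyRange_one]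
  simp

def doneN (m : Nat) : List (Int × Int) :=
  (List.range m).flatMap (fun i => [((i : Int), 0), ((i : Int), 1), ((i : Int), 2)])

def runA (faces : List (Int × Int × Int)) (m : Nat) :
    List (List Int) × PySem.Dict (Int × Int) (Int × Int) :=
  (List.range m).foldl
    (fun st (i : Nat) => (PySem.List.pyRange 0 3 1).foldl (aStep (i : Int) (faces.getD i pvD0)) st)
    ((PySem.List.pyRange 0 (faces.length : Int) 1).map (fun _ => ([-1, -1, -1] : List Int)),
     PySem.Dict.empty)

def runB (faces : List (Int × Int × Int)) (m : Nat) :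
    PySem.Dict (Int × Int) (Int × Int) × PySem.Dict (Int × Int) (Int × Int) :=
  (List.range m).foldl
    (fun fl (i : Nat) => (PySem.List.pyRange 0 3 1).foldl (bStep (i : Int) (faces.getD i pvD0)) fl)
    (PySem.Dict.empty, PySem.Dict.empty)

lemma enum_eq_range_map_aux {α : Type} (l : List α) (d : α) :
    ∀ s : Int, PySem.List.enumerate l s
      = (List.range l.length).map (fun (i : Nat) => (s + (i : Int), l.getD i d)) := by
  induction l with
  | nil => intro s; simp [PySem.List.enumerate_nil]
  | cons x xs ih =>
      intro s
      rw [PySem.List.enumerate_cons, ih (s + 1)]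
      simp only [List.length_cons, List.range_succ_eq_map, List.map_cons, List.map_map]
      refine congrArg₂ _ (by simp) ?_
      apply List.map_congr_left
      intro i _
      simp only [Function.comp_apply, List.getD_cons_succ, Prod.mk.injEq]
      constructor
      · push_cast; ring
      · trivial

lemma enum_eq_range_map {α : Type} (l : List α) (d : α) :
    PySem.List.enumerate l = (List.range l.length).map (fun (i : Nat) => ((i : Int), l.getD i d)) := by
  have h := enum_eq_range_map_aux l d 0
  simpa using h

lemma pyRange03 : PySem.List.pyRange 0 3 1 = [0, 1, 2] := by decide

lemma doneN_succ (m : Nat) :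
    doneN (m + 1) = doneN m ++ [((m : Int), 0), ((m : Int), 1), ((m : Int), 2)] := by
  simp [doneN, List.range_succ]

lemma mem_doneN (m : Nat) (s : Int × Int) : s ∈ doneN m ↔ okSlot m s := by
  induction m with
  | zero => simp [doneN, okSlot]; omega
  | succ m ih =>
      rw [doneN_succ]
      simp only [List.mem_append, ih, okSlot, List.mem_cons,
        List.not_mem_nil, or_false]
      constructor
      · rintro (⟨h0, h1, h2⟩ | h | h | h)
        · exact ⟨h0, by push_cast; omega, h2⟩
        all_goals subst h; refine ⟨by positivity, by push_cast; omega, by simp⟩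
      · rintro ⟨h0, h1, h2⟩
        by_cases hlt : s.1 < (m : Int)
        · exact Or.inl ⟨h0, hlt, h2⟩
        · have hs1 : s.1 = (m : Int) := by push_cast at h1 ⊢; omega
          rcases h2 with h | h | h
          · exact Or.inr (Or.inl (Prod.ext_iff.mpr ⟨hs1, h⟩))
          · exact Or.inr (Or.inr (Or.inl (Prod.ext_iff.mpr ⟨hs1, h⟩)))
          · exact Or.inr (Or.inr (Or.inr (Prod.ext_iff.mpr ⟨hs1, h⟩)))

lemma kOf_nat (faces : List (Int × Int × Int)) (i : Nat) (ei : Int) :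
    kOf faces ((i : Int), ei) = aEdgeKey (faces.getD i pvD0) ei := by
  simp [kOf]

lemma firstOcc_append (faces : List (Int × Int × Int)) (done : List (Int × Int))
    (o : Int × Int) (k : Int × Int) :
    firstOcc faces (done ++ [o]) k
      = (firstOcc faces done k).or (if kOf faces o = k then some o else none) := by
  rw [firstOcc, List.find?_append]
  congr 1
  by_cases h : kOf faces o = k
  · simp [List.find?, h]
  · have hb : (kOf faces o == k) = false := beq_eq_false_iff_ne.mpr h
    simp [List.find?, hb, h]

lemma lastOcc_append (faces : List (Int × Int × Int)) (done : List (Int × Int))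
    (o : Int × Int) (k : Int × Int) :
    lastOcc faces (done ++ [o]) k
      = if kOf faces o = k then some o else lastOcc faces done k := by
  rw [lastOcc, List.reverse_append]
  by_cases h : kOf faces o = k
  · simp [h]
  · have hb : (kOf faces o == k) = false := beq_eq_false_iff_ne.mpr h
    simp [lastOcc, hb, h]

lemma firstOcc_some (faces : List (Int × Int × Int)) {done : List (Int × Int)}
    {k p : Int × Int} (h : firstOcc faces done k = some p) :
    p ∈ done ∧ kOf faces p = k := by
  refine ⟨List.mem_of_find?_eq_some h, ?_⟩
  have := List.find?_some h
  simpa using this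

lemma firstOcc_none (faces : List (Int × Int × Int)) {done : List (Int × Int)}
    {k : Int × Int} (h : firstOcc faces done k = none) :
    ∀ s ∈ done, kOf faces s ≠ k := by
  intro s hs
  have := List.find?_eq_none.mp h s hs
  simpa using this

lemma firstOcc_isSome (faces : List (Int × Int × Int)) {done : List (Int × Int)}
    {s : Int × Int} (hs : s ∈ done) : ∃ p, firstOcc faces done (kOf faces s) = some p := by
  have : (firstOcc faces done (kOf faces s)).isSome := by
    rw [firstOcc, List.find?_isSome]
    exact ⟨s, hs, by simp⟩
  exact Option.isSome_iff_exists.mp this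

lemma lastOcc_isSome (faces : List (Int × Int × Int)) {done : List (Int × Int)}
    {s : Int × Int} (hs : s ∈ done) : ∃ q, lastOcc faces done (kOf faces s) = some q := by
  have : (lastOcc faces done (kOf faces s)).isSome := by
    rw [lastOcc, List.find?_isSome]
    exact ⟨s, by simpa using hs, by simp⟩
  exact Option.isSome_iff_exists.mp this

lemma specP_append_none (faces : List (Int × Int × Int)) {done : List (Int × Int)}
    {o : Int × Int} (h : firstOcc faces done (kOf faces o) = none) (hnew : o ∉ done) :
    ∀ s, specP faces (done ++ [o]) s = specP faces done s := by
  intro s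
  unfold specP
  by_cases hks : kOf faces s = kOf faces o
  · by_cases hso : s = o
    · subst hso
      rw [firstOcc_append, lastOcc_append, h]
      simp [hnew]
    · have hsd : s ∉ done := fun hs => (firstOcc_none faces h s hs) hks
      have hsd2 : s ∉ done ++ [o] := by simp [hsd, hso]
      rw [if_neg hsd2, if_neg hsd]
  · have hso : s ≠ o := fun he => hks (he ▸ rfl)
    have hf : firstOcc faces (done ++ [o]) (kOf faces s) = firstOcc faces done (kOf faces s) := by
      rw [firstOcc_append, if_neg (fun hh => hks hh.symm), Option.or_none]
    have hla : lastOcc faces (done ++ [o]) (kOf faces s) = lastOcc faces done (kOf faces s) := by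
      rw [lastOcc_append, if_neg (fun hh => hks hh.symm)]
    rw [hf, hla]
    simp [List.mem_append, hso]

lemma specP_append_some (faces : List (Int × Int × Int)) {done : List (Int × Int)}
    {o p : Int × Int} (h : firstOcc faces done (kOf faces o) = some p) (hnew : o ∉ done) :
    ∀ s, specP faces (done ++ [o]) s
      = if s = p then o.1 else if s = o then p.1 else specP faces done s := by
  have hpmem := (firstOcc_some faces h).1
  have hpk := (firstOcc_some faces h).2
  have hpo : p ≠ o := fun e => hnew (e ▸ hpmem)
  intro s
  by_cases hsp : s = p
  · subst hsp
    rw [if_pos rfl]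
    unfold specP
    rw [hpk, firstOcc_append, lastOcc_append, h]
    have hmem : s ∈ done ++ [o] := by simp [hpmem]
    simp [hmem, Ne.symm hpo]
  · rw [if_neg hsp]
    by_cases hso : s = o
    · subst hso
      rw [if_pos rfl]
      unfold specP
      rw [firstOcc_append, h]
      have hmem : s ∈ done ++ [s] := by simp
      simp [hmem, hpo]
    · rw [if_neg hso]
      by_cases hks : kOf faces s = kOf faces o
      · unfold specP
        rw [hks, firstOcc_append, lastOcc_append, h]
        simp [List.mem_append, hso, Ne.symm hsp]
      · have hf : firstOcc faces (done ++ [o]) (kOf faces s) = firstOcc faces done (kOf faces s) := by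
          rw [firstOcc_append, if_neg (fun hh => hks hh.symm), Option.or_none]
        have hla : lastOcc faces (done ++ [o]) (kOf faces s) = lastOcc faces done (kOf faces s) := by
          rw [lastOcc_append, if_neg (fun hh => hks hh.symm)]
        unfold specP
        rw [hf, hla]
        simp [List.mem_append, hso]

lemma setAdj_buildAdj (n : Nat) (f : Int × Int → Int) (fi ei v : Int)
    (h0 : 0 ≤ fi) (h1 : fi < (n : Int)) (he : ei = 0 ∨ ei = 1 ∨ ei = 2) :
    setAdj (buildAdj n f) fi ei v = buildAdj n (fun s => if s = (fi, ei) then v else f s) := by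
  have hfi : ((fi.toNat : Int)) = fi := Int.toNat_of_nonneg h0
  have hfl : fi.toNat < n := by omega
  have hrow : PySem.List.pyGetD (buildAdj n f) fi ([] : List Int)
      = [f (fi, 0), f (fi, 1), f (fi, 2)] := by
    rw [PySem.List.pyGetD_eq_getElem _ _ h0 (by rw [buildAdj_length]; exact_mod_cast h1)]
    rw [buildAdj_getElem, hfi]
  unfold setAdj
  rw [hrow, PySem.List.pySetD_of_nonneg _ _ h0,
    PySem.List.pySetD_of_nonneg _ _ (show (0 : Int) ≤ ei by rcases he with he | he | he <;> simp [he])]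
  apply List.ext_getElem
  · simp [buildAdj_length]
  · intro j hj1 hj2
    rw [List.getElem_set]
    by_cases hjf : fi.toNat = j
    · subst hjf
      rw [if_pos rfl, buildAdj_getElem, hfi]
      rcases he with he | he | he <;> subst he <;> simp [List.set, Prod.ext_iff]
    · rw [if_neg hjf, buildAdj_getElem, buildAdj_getElem]
      have hj : j < n := by
        have := hj2
        rw [buildAdj_length] at this
        exact this
      have hjne : ((j : Int)) ≠ fi := by omega
      simp [Prod.ext_iff, hjne]

lemma okSlot_mono {m n : Nat} (h : m ≤ n) {s : Int × Int} (hs : okSlot m s) :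
    okSlot n s := by
  obtain ⟨h0, h1, h2⟩ := hs
  have hmn : ((m : Int)) ≤ (n : Int) := by exact_mod_cast h
  exact ⟨h0, by omega, h2⟩

lemma okSlot_mk {n : Nat} (i : Nat) (ei : Int) (h : i < n) (he : ei = 0 ∨ ei = 1 ∨ ei = 2) :
    okSlot n ((i : Int), ei) := by
  unfold okSlot
  dsimp only
  exact ⟨by positivity, by exact_mod_cast h, he⟩

lemma not_mem_doneN_self (m : Nat) (ei : Int) : ((m : Int), ei) ∉ doneN m := by
  intro h
  obtain ⟨_, h1, _⟩ := (mem_doneN m _).1 h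
  simp at h1

lemma bEdgeKey_eq (face : Int × Int × Int) (ei : Int) : bEdgeKey face ei = aEdgeKey face ei := by
  simp only [bEdgeKey, aEdgeKey, min_def, max_def]
  split_ifs <;> rfl

lemma buildAdj_eq_range (n : Nat) (f : Int × Int → Int) :
    buildAdj n f = (List.range n).map (fun (j : Nat) => [f ((j : Int), 0), f ((j : Int), 1), f ((j : Int), 2)]) := by
  unfold buildAdj
  rw [PySem.List.pyRange_one, List.map_map]
  have hn : (((n : Int)) - 0).toNat = n := by simp
  rw [hn]
  apply List.map_congr_left
  intro k hk
  simp [Function.comp]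

lemma occStepA (faces : List (Int × Int × Int)) (done : List (Int × Int))
    (em : PySem.Dict (Int × Int) (Int × Int)) (i : Nat) (ei : Int)
    (hi : i < faces.length) (hei : ei = 0 ∨ ei = 1 ∨ ei = 2)
    (hd : ∀ s ∈ done, okSlot faces.length s)
    (hnew : ((i : Int), ei) ∉ done)
    (hem : ∀ k, em.get? k = firstOcc faces done k) :
    ∃ em', aStep (i : Int) (faces.getD i pvD0) (buildAdj faces.length (specP faces done), em) ei
        = (buildAdj faces.length (specP faces (done ++ [((i : Int), ei)])), em')
      ∧ ∀ k, em'.get? k = firstOcc faces (done ++ [((i : Int), ei)]) k := by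
  have hk : aEdgeKey (faces.getD i pvD0) ei = kOf faces ((i : Int), ei) := (kOf_nat faces i ei).symm
  cases hfo : firstOcc faces done (kOf faces ((i : Int), ei)) with
  | none =>
      have hget : em.get? (aEdgeKey (faces.getD i pvD0) ei) = none := by rw [hk, hem, hfo]
      refine ⟨em.insert (kOf faces ((i : Int), ei)) ((i : Int), ei), ?_, ?_⟩
      · simp only [aStep, hget]
        refine Prod.ext ?_ ?_
        · exact congrArg (buildAdj faces.length)
            (funext fun s => (specP_append_none faces hfo hnew s).symm)
        · rw [hk]
      · intro k
        rw [PySem.Dict.get?_insert, firstOcc_append]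
        by_cases hkk : k = kOf faces ((i : Int), ei)
        · rw [if_pos hkk, hkk, hfo, if_pos rfl]
          rfl
        · rw [if_neg hkk, if_neg (fun hh => hkk hh.symm), Option.or_none, hem]
  | some p =>
      have hget : em.get? (aEdgeKey (faces.getD i pvD0) ei) = some p := by rw [hk, hem, hfo]
      have hp := firstOcc_some faces hfo
      obtain ⟨hp0, hp1, hp2⟩ := hd p hp.1
      have hnp : p ≠ ((i : Int), ei) := fun e => hnew (e ▸ hp.1)
      refine ⟨em, ?_, ?_⟩
      · simp only [aStep, hget]
        refine Prod.ext ?_ rfl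
        dsimp only
        rw [setAdj_buildAdj _ _ _ _ _ (by positivity) (by exact_mod_cast hi) hei,
          setAdj_buildAdj _ _ _ _ _ hp0 hp1 hp2]
        refine congrArg (buildAdj faces.length) (funext fun s => ?_)
        rw [specP_append_some faces hfo hnew s]
      · intro k
        rw [firstOcc_append]
        by_cases hkk : kOf faces ((i : Int), ei) = k
        · rw [if_pos hkk, hem, ← hkk, hfo]
          simp
        · rw [if_neg hkk, Option.or_none, hem]

lemma runA_spec (faces : List (Int × Int × Int)) :
    ∀ m, m ≤ faces.length →
      (runA faces m).1 = buildAdj faces.length (specP faces (doneN m))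
      ∧ ∀ k, (runA faces m).2.get? k = firstOcc faces (doneN m) k := by
  intro m
  induction m with
  | zero =>
      intro _
      constructor
      · simp only [runA, List.range_zero, List.foldl_nil]
        unfold buildAdj
        apply List.map_congr_left
        intro i _
        simp [specP, doneN]
      · intro k
        simp [runA, firstOcc, doneN, PySem.Dict.get?_empty]
  | succ m ih =>
      intro hm
      have hm' : m ≤ faces.length := by omega
      have hmlt : m < faces.length := by omega
      obtain ⟨ha, hge⟩ := ih hm'
      have hstep : runA faces (m + 1)
          = (PySem.List.pyRange 0 3 1).foldl (aStep (m : Int) (faces.getD m pvD0)) (runA faces m) := by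
        simp [runA, List.range_succ]
      have hpair : runA faces m
          = (buildAdj faces.length (specP faces (doneN m)), (runA faces m).2) :=
        Prod.ext ha rfl
      have hdm : ∀ s ∈ doneN m, okSlot faces.length s :=
        fun s hs => okSlot_mono hm' ((mem_doneN m s).1 hs)
      have hd0 : ∀ s ∈ doneN m ++ [((m : Int), 0)], okSlot faces.length s := by
        intro s hs
        rcases List.mem_append.1 hs with hs | hs
        · exact hdm s hs
        · simp at hs
          subst hs
          exact okSlot_mk m 0 hmlt (by simp)
      have hd1 : ∀ s ∈ (doneN m ++ [((m : Int), 0)]) ++ [((m : Int), 1)], okSlot faces.length s := by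
        intro s hs
        rcases List.mem_append.1 hs with hs | hs
        · exact hd0 s hs
        · simp at hs
          subst hs
          exact okSlot_mk m 1 hmlt (by simp)
      have hn0 : ((m : Int), (0 : Int)) ∉ doneN m := not_mem_doneN_self m 0
      have hn1 : ((m : Int), (1 : Int)) ∉ doneN m ++ [((m : Int), 0)] := by
        rw [List.mem_append]
        rintro (h | h)
        · exact not_mem_doneN_self m 1 h
        · simp at h
      have hn2 : ((m : Int), (2 : Int)) ∉ (doneN m ++ [((m : Int), 0)]) ++ [((m : Int), 1)] := by
        rw [List.mem_append]
        rintro (h | h)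
        · rw [List.mem_append] at h
          rcases h with h | h
          · exact not_mem_doneN_self m 2 h
          · simp at h
        · simp at h
      obtain ⟨em1, e1, g1⟩ := occStepA faces (doneN m) ((runA faces m).2) m 0 hmlt (by simp) hdm hn0 hge
      obtain ⟨em2, e2, g2⟩ := occStepA faces (doneN m ++ [((m : Int), 0)]) em1 m 1 hmlt (by simp) hd0 hn1 g1
      obtain ⟨em3, e3, g3⟩ := occStepA faces ((doneN m ++ [((m : Int), 0)]) ++ [((m : Int), 1)]) em2 m 2 hmlt (by simp) hd1 hn2 g2
      have hdone : (((doneN m ++ [((m : Int), 0)]) ++ [((m : Int), 1)]) ++ [((m : Int), 2)]) = doneN (m + 1) := by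
        rw [doneN_succ]
        simp
      rw [hstep, pyRange03, hpair]
      simp only [List.foldl_cons, List.foldl_nil]
      rw [e1, e2, e3, hdone]
      rw [hdone] at g3
      exact ⟨rfl, g3⟩

lemma occStepB (faces : List (Int × Int × Int)) (done : List (Int × Int))
    (fl : PySem.Dict (Int × Int) (Int × Int) × PySem.Dict (Int × Int) (Int × Int))
    (i : Nat) (ei : Int)
    (hf : ∀ k, fl.1.get? k = firstOcc faces done k)
    (hl : ∀ k, fl.2.get? k = lastOcc faces done k) :
    (∀ k, (bStep (i : Int) (faces.getD i pvD0) fl ei).1.get? k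
        = firstOcc faces (done ++ [((i : Int), ei)]) k)
    ∧ ∀ k, (bStep (i : Int) (faces.getD i pvD0) fl ei).2.get? k
        = lastOcc faces (done ++ [((i : Int), ei)]) k := by
  have hk : bEdgeKey (faces.getD i pvD0) ei = kOf faces ((i : Int), ei) := by
    rw [bEdgeKey_eq]
    exact (kOf_nat faces i ei).symm
  constructor
  · intro k
    simp only [bStep, hk]
    by_cases hc : fl.1.contains (kOf faces ((i : Int), ei))
    · rw [PySem.Dict.setdefault_of_contains _ _ hc, hf, firstOcc_append]
      rw [PySem.Dict.contains_eq_isSome_get?, hf] at hc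
      by_cases hkk : kOf faces ((i : Int), ei) = k
      · rw [if_pos hkk, ← hkk]
        obtain ⟨p, hp⟩ := Option.isSome_iff_exists.mp hc
        rw [hp]
        rfl
      · rw [if_neg hkk, Option.or_none]
    · rw [PySem.Dict.setdefault_of_not_contains _ _ (by simpa using hc), PySem.Dict.get?_insert, firstOcc_append]
      rw [PySem.Dict.contains_eq_isSome_get?, hf] at hc
      have hnone : firstOcc faces done (kOf faces ((i : Int), ei)) = none := by
        cases hx : firstOcc faces done (kOf faces ((i : Int), ei)) with
        | none => rfl
        | some p => rw [hx] at hc; simp at hc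
      by_cases hkk : k = kOf faces ((i : Int), ei)
      · rw [if_pos hkk, hkk, hnone, if_pos rfl]
        rfl
      · rw [if_neg hkk, if_neg (fun hh => hkk hh.symm), Option.or_none, hf]
  · intro k
    simp only [bStep, hk]
    rw [PySem.Dict.get?_insert, lastOcc_append]
    by_cases hkk : k = kOf faces ((i : Int), ei)
    · rw [if_pos hkk, hkk, if_pos rfl]
    · rw [if_neg hkk, if_neg (fun hh => hkk hh.symm), hl]

lemma runB_spec (faces : List (Int × Int × Int)) :
    ∀ m, (∀ k, (runB faces m).1.get? k = firstOcc faces (doneN m) k)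
      ∧ ∀ k, (runB faces m).2.get? k = lastOcc faces (doneN m) k := by
  intro m
  induction m with
  | zero =>
      constructor <;> intro k <;>
        simp [runB, firstOcc, lastOcc, doneN, PySem.Dict.get?_empty]
  | succ m ih =>
      obtain ⟨hf, hl⟩ := ih
      have hstep : runB faces (m + 1)
          = (PySem.List.pyRange 0 3 1).foldl (bStep (m : Int) (faces.getD m pvD0)) (runB faces m) := by
        simp [runB, List.range_succ]
      obtain ⟨f1, l1⟩ := occStepB faces (doneN m) (runB faces m) m 0 hf hl
      obtain ⟨f2, l2⟩ := occStepB faces (doneN m ++ [((m : Int), 0)]) _ m 1 f1 l1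
      obtain ⟨f3, l3⟩ := occStepB faces ((doneN m ++ [((m : Int), 0)]) ++ [((m : Int), 1)]) _ m 2 f2 l2
      have hdone : (((doneN m ++ [((m : Int), 0)]) ++ [((m : Int), 1)]) ++ [((m : Int), 2)]) = doneN (m + 1) := by
        rw [doneN_succ]
        simp
      rw [hstep, pyRange03]
      simp only [List.foldl_cons, List.foldl_nil]
      rw [hdone] at f3 l3
      exact ⟨f3, l3⟩

lemma bSlot_eq_specP (faces : List (Int × Int × Int))
    (first last : PySem.Dict (Int × Int) (Int × Int)) (i : Nat) (ei : Int)
    (hi : i < faces.length) (hei : ei = 0 ∨ ei = 1 ∨ ei = 2)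
    (hf : ∀ k, first.get? k = firstOcc faces (doneN faces.length) k)
    (hl : ∀ k, last.get? k = lastOcc faces (doneN faces.length) k) :
    bSlot first last (i : Int) (faces.getD i pvD0) ei
      = specP faces (doneN faces.length) ((i : Int), ei) := by
  have hmem : ((i : Int), ei) ∈ doneN faces.length :=
    (mem_doneN _ _).2 (okSlot_mk i ei hi hei)
  obtain ⟨p, hp⟩ := firstOcc_isSome faces hmem
  obtain ⟨q, hq⟩ := lastOcc_isSome faces hmem
  have hbk : bEdgeKey (faces.getD i pvD0) ei = kOf faces ((i : Int), ei) := by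
    rw [bEdgeKey_eq]
    exact (kOf_nat faces i ei).symm
  simp only [bSlot, hbk, hf, hl, hp, hq]
  unfold specP
  rw [if_pos hmem, hp, hq]
  by_cases hpo : p = ((i : Int), ei) <;> by_cases hqo : q = ((i : Int), ei) <;>
    simp [hpo, hqo]

lemma portA_eq (faces : List (Int × Int × Int)) :
    compute_face_adjacency_py faces = buildAdj faces.length (specP faces (doneN faces.length)) := by
  have h := (runA_spec faces faces.length le_rfl).1
  have heq : compute_face_adjacency_py faces = (runA faces faces.length).1 := by
    unfold compute_face_adjacency_py runA
    simp only [enum_eq_range_map faces pvD0, List.foldl_map]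
  rw [heq, h]

lemma portB_eq (faces : List (Int × Int × Int)) :
    compute_face_adjacency_py_alt faces
      = buildAdj faces.length (specP faces (doneN faces.length)) := by
  obtain ⟨hf, hl⟩ := runB_spec faces faces.length
  have heq : compute_face_adjacency_py_alt faces
      = ((List.range faces.length).map (fun (i : Nat) => ((i : Int), faces.getD i pvD0))).map
          (fun p => (PySem.List.pyRange 0 3 1).map
            (bSlot (runB faces faces.length).1 (runB faces faces.length).2 p.1 p.2)) := by
    unfold compute_face_adjacency_py_alt runB
    simp only [enum_eq_range_map faces pvD0, List.foldl_map]
  rw [heq, List.map_map, buildAdj_eq_range]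
  apply List.map_congr_left
  intro i hi
  rw [List.mem_range] at hi
  rw [pyRange03]
  simp only [Function.comp_apply, List.map_cons, List.map_nil]
  rw [bSlot_eq_specP faces _ _ i 0 hi (by simp) hf hl,
    bSlot_eq_specP faces _ _ i 1 hi (by simp) hf hl,
    bSlot_eq_specP faces _ _ i 2 hi (by simp) hf hl]

-- ===== VERDICT (by name: the statement is the Claim_ definition above) =====
theorem compute_face_adjacency_py_spec : Claim_equal_compute_face_adjacency_py := by
  intro faces _
  unfold Spec_compute_face_adjacency_py
  rw [portA_eq, portB_eq]
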